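-- pv_equiv track=rewrite | github.com/qkre/Problem-Solve | PJH/BOJ/G3/2638.py | melt_cheese
-- ===== SOURCE A (Python) =====
-- from collections import deque
-- from copy import deepcopy
--
-- D = [(-1, 0), (1, 0), (0, -1), (0, 1)]
--
-- def is_outside(air, maps, N, M, q):
--     while q:
--         r, c = q.popleft()
--
--         for dr, dc in D:
--             nr, nc = r + dr, c + dc
--
--             if (0 <= nr < N and 0 <= nc < M) and not air[nr][nc] and maps[nr][nc] == 0:
--                 air[nr][nc] = True
--                 q.append((nr, nc))
--
-- def melt_cheese(air, maps, N, M):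
--
--     new_maps = deepcopy(maps)
--
--     air_pockets = deque()
--
--     for r in range(N):
--         for c in range(M):
--             if maps[r][c] == 1:
--                 cnt = 0
--                 for dr, dc in D:
--                     nr, nc = r + dr, c + dc
--
--                     if (0 <= nr < N and 0 <= nc < M) and air[nr][nc] and maps[nr][nc] == 0:
--                         cnt += 1
--
--                 if cnt >= 2:
--                     new_maps[r][c] = 0
--                     air[r][c] = True
--                     air_pockets.append((r, c))
--
--     is_outside(air, new_maps, N, M, air_pockets)
--
--     return new_maps
-- ===== SOURCE B (Python) =====
-- from collections import Counter
-- from copy import deepcopy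
--
-- D = [(-1, 0), (1, 0), (0, -1), (0, 1)]
--
-- # Return-value equivalent to A (A also mutates `air` in place; B does not touch `air`).
-- def melt_cheese(air, maps, N, M):
--     cnt = Counter()
--     for r in range(N):
--         for c in range(M):
--             if maps[r][c] == 0 and air[r][c]:
--                 for dr, dc in D:
--                     cnt[(r + dr, c + dc)] += 1
--     new_maps = deepcopy(maps)
--     for r in range(N):
--         for c in range(M):
--             if maps[r][c] == 1 and cnt[(r, c)] >= 2:
--                 new_maps[r][c] = 0
--     return new_maps
-- ===== Notes on version B (the rewrite author's own statement) =====
-- stated objective: alternative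
-- what changed: A gather-counts, for every cheese cell, its outside-air neighbours with an inner loop over directions, then runs a BFS flood that only mutates air; B makes one scatter pass that bumps a Counter at the four neighbours of every outside-air cell, reads the Counter at cheese cells, and drops the BFS entirely since it never affects the returned grid (return value only: A also mutates air in place, B does not).
import Mathlib
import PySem

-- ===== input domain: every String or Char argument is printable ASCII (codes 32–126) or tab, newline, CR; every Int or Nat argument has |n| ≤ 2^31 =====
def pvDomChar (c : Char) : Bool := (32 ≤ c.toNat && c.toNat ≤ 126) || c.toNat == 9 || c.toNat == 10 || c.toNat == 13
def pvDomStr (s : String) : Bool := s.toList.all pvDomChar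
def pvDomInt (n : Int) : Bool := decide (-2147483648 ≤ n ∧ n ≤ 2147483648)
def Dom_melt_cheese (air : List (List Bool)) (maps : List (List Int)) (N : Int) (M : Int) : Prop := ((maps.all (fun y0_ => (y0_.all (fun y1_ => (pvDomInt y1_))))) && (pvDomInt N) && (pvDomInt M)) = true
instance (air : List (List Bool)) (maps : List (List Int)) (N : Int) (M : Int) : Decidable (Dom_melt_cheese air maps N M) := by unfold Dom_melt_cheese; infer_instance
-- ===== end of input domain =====

-- B replaces A's per-cheese-cell gather count by one scatter pass into a Counter and drops the
-- dead BFS flood (objective: alternative decomposition). Equivalence is about the RETURN value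
-- only: Python A also mutates `air` in place (phase-1 marks and the BFS flood), B does not.

-- ===== shared grid primitives (Python g[r][c] reads / g[r][c] = v writes) =====
def pvCellI (g : List (List Int)) (r c : Int) : Int :=
  PySem.List.pyGetD (PySem.List.pyGetD g r []) c 0
def pvCellB (g : List (List Bool)) (r c : Int) : Bool :=
  PySem.List.pyGetD (PySem.List.pyGetD g r []) c false
def pvSetI (g : List (List Int)) (r c : Int) (v : Int) : List (List Int) :=
  PySem.List.pySetD g r (PySem.List.pySetD (PySem.List.pyGetD g r []) c v)
def pvSetB (g : List (List Bool)) (r c : Int) (v : Bool) : List (List Bool) :=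
  PySem.List.pySetD g r (PySem.List.pySetD (PySem.List.pyGetD g r []) c v)

def pvDirs : List (Int × Int) := [(-1, 0), (1, 0), (0, -1), (0, 1)]

-- "neighbour (r,c) is outside air": in bounds, air true, maps 0 (A's phase-1 test, in A's order)
abbrev pvOut (a : List (List Bool)) (maps : List (List Int)) (N M r c : Int) : Prop :=
  (0 ≤ r ∧ r < N ∧ 0 ≤ c ∧ c < M) ∧ pvCellB a r c = true ∧ pvCellI maps r c = 0

-- ===== PORT A =====
-- A's cnt loop over D for one cheese cell (reads the CURRENT, partially mutated air `a`)
def pvGather (a : List (List Bool)) (maps : List (List Int)) (N M r c : Int) : Int :=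
  pvDirs.foldl (fun cnt d => if pvOut a maps N M (r + d.1) (c + d.2) then cnt + 1 else cnt) 0

-- the body of A's double loop; state = (new_maps, air)
def pvStepA (maps : List (List Int)) (N M : Int)
    (st : List (List Int) × List (List Bool)) (p : Int × Int) :
    List (List Int) × List (List Bool) :=
  if pvCellI maps p.1 p.2 = 1 then
    if 2 ≤ pvGather st.2 maps N M p.1 p.2 then
      (pvSetI st.1 p.1 p.2 0, pvSetB st.2 p.1 p.2 true)
    else st
  else st

-- new_maps = deepcopy(maps); the final is_outside BFS call only mutates `air`, which is not part
-- of the returned value, so it is omitted in this port (return-value semantics).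
def melt_cheese (air : List (List Bool)) (maps : List (List Int)) (N : Int) (M : Int) :
    List (List Int) :=
  ((PySem.List.pyRange 0 N 1).foldl (fun st r =>
      (PySem.List.pyRange 0 M 1).foldl (fun st c => pvStepA maps N M st (r, c)) st)
    (maps, air)).1

-- ===== PORT B =====
-- cnt[(r,c)] += 1 on a Counter
def pvBump (d : PySem.Dict (Int × Int) Int) (k : Int × Int) : PySem.Dict (Int × Int) Int :=
  d.modify k 0 (· + 1)

-- B's scatter pass: cnt = Counter(); for every outside-air cell bump its four neighbours
def pvCntB (air : List (List Bool)) (maps : List (List Int)) (N M : Int) :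
    PySem.Dict (Int × Int) Int :=
  (PySem.List.pyRange 0 N 1).foldl (fun d r =>
    (PySem.List.pyRange 0 M 1).foldl (fun d c =>
      if pvCellI maps r c = 0 ∧ pvCellB air r c = true then
        pvDirs.foldl (fun d dd => pvBump d (r + dd.1, c + dd.2)) d
      else d) d) PySem.Dict.empty

def melt_cheese_alt (air : List (List Bool)) (maps : List (List Int)) (N : Int) (M : Int) :
    List (List Int) :=
  (PySem.List.pyRange 0 N 1).foldl (fun nm r =>
    (PySem.List.pyRange 0 M 1).foldl (fun nm c =>
      if pvCellI maps r c = 1 ∧ 2 ≤ (pvCntB air maps N M).getD (r, c) 0 then pvSetI nm r c 0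
      else nm) nm) maps

-- ===== PRECONDITION & SPEC =====
-- Pre_ excludes exactly the inputs where Python A raises IndexError: when both loop bounds are
-- positive, the first N rows of air and maps must exist and each have at least M columns.
def Pre_melt_cheese (air : List (List Bool)) (maps : List (List Int)) (N : Int) (M : Int) : Prop :=
  0 < N → 0 < M →
    ((N : Int) ≤ air.length ∧ (N : Int) ≤ maps.length ∧
      ∀ i : Nat, i < N.toNat →
        ((M : Int) ≤ (air.getD i []).length ∧ (M : Int) ≤ (maps.getD i []).length))
instance (air : List (List Bool)) (maps : List (List Int)) (N : Int) (M : Int) :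
    Decidable (Pre_melt_cheese air maps N M) := by unfold Pre_melt_cheese; infer_instance

def pvWitness_melt_cheese : List (List Bool) × List (List Int) × Int × Int :=
  ([[true, false], [true, false]], [[0, 1], [0, 1]], 2, 2)

def Spec_melt_cheese (air : List (List Bool)) (maps : List (List Int)) (N : Int) (M : Int) (out : List (List Int)) : Prop := out = melt_cheese_alt air maps N M
instance (air : List (List Bool)) (maps : List (List Int)) (N : Int) (M : Int) (out : List (List Int)) : Decidable (Spec_melt_cheese air maps N M out) := by unfold Spec_melt_cheese; infer_instance

-- ===== CLAIM (what is proved, stated in full; the proofs are below) =====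
def Claim_equal_melt_cheese : Prop := ∀ (air : List (List Bool)) (maps : List (List Int)) (N : Int) (M : Int), Dom_melt_cheese air maps N M → Pre_melt_cheese air maps N M → Spec_melt_cheese air maps N M (melt_cheese air maps N M)

-- ===== LEMMAS AND PROOFS =====

def pvCells (N M : Int) : List (Int × Int) :=
  (PySem.List.pyRange 0 N 1).flatMap (fun r => (PySem.List.pyRange 0 M 1).map (fun c => (r, c)))
def pvIncs (air : List (List Bool)) (maps : List (List Int)) (N M : Int) : List (Int × Int) :=
  (pvCells N M).flatMap (fun p =>
    if pvCellI maps p.1 p.2 = 0 ∧ pvCellB air p.1 p.2 = true then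
      pvDirs.map (fun d => (p.1 + d.1, p.2 + d.2))
    else [])

theorem pv_sum_indicator {α : Type} [DecidableEq α] (l : List α) (hl : l.Nodup) (v : α) (e : Nat) :
    (l.map fun x => if x = v then e else 0).sum = if v ∈ l then e else 0 := by
  induction l with
  | nil => simp
  | cons x t ih =>
    simp only [List.map_cons, List.sum_cons, List.mem_cons]
    rcases List.nodup_cons.mp hl with ⟨hx, ht⟩
    by_cases hxv : x = v
    · subst hxv; simp [ih ht, hx]
    · simp [hxv, Ne.symm hxv, ih ht]

theorem pv_sum_flatMap {α : Type} (l : List α) (f : α → List Nat) :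
    (l.flatMap f).sum = (l.map fun a => (f a).sum).sum := by
  induction l with
  | nil => rfl
  | cons x t ih => simp [ih]

theorem pv_sum_indicator_cells (N M : Int) (v : Int × Int) (e : Nat) :
    ((pvCells N M).map fun p => if p = v then e else 0).sum
      = if 0 ≤ v.1 ∧ v.1 < N ∧ 0 ≤ v.2 ∧ v.2 < M then e else 0 := by
  rw [pvCells, List.map_flatMap]
  have h1 : ∀ r : Int,
      ((PySem.List.pyRange 0 M 1).map (fun c => (r, c))).map (fun p => if p = v then e else 0)
        = (PySem.List.pyRange 0 M 1).map
            (fun c => if c = v.2 then (if r = v.1 then e else 0) else 0) := by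
    intro r
    rw [List.map_map]
    apply List.map_congr_left
    intro c _
    by_cases hc : c = v.2 <;> by_cases hr : r = v.1 <;> simp_all [Prod.ext_iff]
  have h2 : ∀ r : Int,
      ((PySem.List.pyRange 0 M 1).map
          (fun c => if c = v.2 then (if r = v.1 then e else 0) else 0)).sum
        = if r = v.1 then (if 0 ≤ v.2 ∧ v.2 < M then e else 0) else 0 := by
    intro r
    rw [pv_sum_indicator _ (PySem.List.nodup_pyRange_one 0 M) v.2]
    by_cases hr : r = v.1 <;> by_cases hm : v.2 ∈ PySem.List.pyRange 0 M 1 <;>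
      simp_all [PySem.List.mem_pyRange_one]
  have h3 : ((PySem.List.pyRange 0 N 1).flatMap
        (fun r => ((PySem.List.pyRange 0 M 1).map (fun c => (r, c))).map
          (fun p => if p = v then e else 0))).sum
      = ((PySem.List.pyRange 0 N 1).map
          (fun r => if r = v.1 then (if 0 ≤ v.2 ∧ v.2 < M then e else 0) else 0)).sum := by
    rw [pv_sum_flatMap]
    apply congrArg
    apply List.map_congr_left
    intro r _
    rw [h1 r, h2 r]
  rw [h3, pv_sum_indicator _ (PySem.List.nodup_pyRange_one 0 N) v.1]
  simp only [PySem.List.mem_pyRange_one]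
  split_ifs <;> first | rfl | (exfalso; omega)

theorem pv_count_flatMap {α β : Type} [BEq β] (l : List α) (f : α → List β) (b : β) :
    (l.flatMap f).count b = (l.map fun a => (f a).count b).sum := by
  induction l with
  | nil => simp
  | cons x t ih => simp [List.count_append, ih]

theorem pv_ind_shift {α : Type} [DecidableEq α] (p v : α) (P : α → Prop) [DecidablePred P]
    (e : Nat) (he : e = if P v then 1 else 0) :
    (if p = v ∧ P p then 1 else 0) = if p = v then e else 0 := by
  by_cases hp : p = v
  · subst hp; simp [he]
  · simp [hp]

theorem pv_count_incs (air : List (List Bool)) (maps : List (List Int)) (N M : Int)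
    (q : Int × Int) :
    ((pvIncs air maps N M).count q : Int) = pvGather air maps N M q.1 q.2 := by
  rw [pvIncs, pv_count_flatMap]
  have hpiece : ∀ p : Int × Int,
      (if pvCellI maps p.1 p.2 = 0 ∧ pvCellB air p.1 p.2 = true then
          pvDirs.map (fun d => (p.1 + d.1, p.2 + d.2))
        else []).count q
      = (((if p = (q.1 + 1, q.2) ∧ pvCellI maps p.1 p.2 = 0 ∧ pvCellB air p.1 p.2 = true then 1 else 0)
          + (if p = (q.1 - 1, q.2) ∧ pvCellI maps p.1 p.2 = 0 ∧ pvCellB air p.1 p.2 = true then 1 else 0))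
          + (if p = (q.1, q.2 + 1) ∧ pvCellI maps p.1 p.2 = 0 ∧ pvCellB air p.1 p.2 = true then 1 else 0))
          + (if p = (q.1, q.2 - 1) ∧ pvCellI maps p.1 p.2 = 0 ∧ pvCellB air p.1 p.2 = true then 1 else 0) := by
    intro p
    by_cases hs : pvCellI maps p.1 p.2 = 0 ∧ pvCellB air p.1 p.2 = true
    · rw [if_pos hs]
      simp only [hs, and_true, pvDirs, List.map_cons, List.map_nil,
        List.count_cons, List.count_nil, beq_iff_eq, Prod.ext_iff]
      split_ifs <;> first | rfl | (exfalso; omega)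
    · simp [hs]
  rw [List.map_congr_left (fun p _ => hpiece p)]
  rw [List.sum_map_add, List.sum_map_add, List.sum_map_add]
  rw [List.map_congr_left (fun p (_ : p ∈ pvCells N M) => pv_ind_shift p (q.1 + 1, q.2)
        (fun x => pvCellI maps x.1 x.2 = 0 ∧ pvCellB air x.1 x.2 = true)
        (if pvCellI maps (q.1+1) q.2 = 0 ∧ pvCellB air (q.1+1) q.2 = true then 1 else 0) rfl)]
  rw [List.map_congr_left (fun p (_ : p ∈ pvCells N M) => pv_ind_shift p (q.1 - 1, q.2)
        (fun x => pvCellI maps x.1 x.2 = 0 ∧ pvCellB air x.1 x.2 = true)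
        (if pvCellI maps (q.1-1) q.2 = 0 ∧ pvCellB air (q.1-1) q.2 = true then 1 else 0) rfl)]
  rw [List.map_congr_left (fun p (_ : p ∈ pvCells N M) => pv_ind_shift p (q.1, q.2 + 1)
        (fun x => pvCellI maps x.1 x.2 = 0 ∧ pvCellB air x.1 x.2 = true)
        (if pvCellI maps q.1 (q.2+1) = 0 ∧ pvCellB air q.1 (q.2+1) = true then 1 else 0) rfl)]
  rw [List.map_congr_left (fun p (_ : p ∈ pvCells N M) => pv_ind_shift p (q.1, q.2 - 1)
        (fun x => pvCellI maps x.1 x.2 = 0 ∧ pvCellB air x.1 x.2 = true)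
        (if pvCellI maps q.1 (q.2-1) = 0 ∧ pvCellB air q.1 (q.2-1) = true then 1 else 0) rfl)]
  rw [pv_sum_indicator_cells, pv_sum_indicator_cells, pv_sum_indicator_cells,
    pv_sum_indicator_cells]
  have haux : ∀ r c : Int,
      ((if 0 ≤ r ∧ r < N ∧ 0 ≤ c ∧ c < M then
          (if pvCellI maps r c = 0 ∧ pvCellB air r c = true then (1:Int) else 0) else 0) : Int)
        = if pvOut air maps N M r c then 1 else 0 := by
    intro r c
    by_cases h1 : (0 ≤ r ∧ r < N ∧ 0 ≤ c ∧ c < M)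
    · by_cases h2 : pvCellI maps r c = 0 ∧ pvCellB air r c = true
      · rw [if_pos h1, if_pos h2, if_pos ⟨h1, h2.2, h2.1⟩]
      · rw [if_pos h1, if_neg h2, if_neg (fun ho => h2 ⟨ho.2.2, ho.2.1⟩)]
    · rw [if_neg h1, if_neg (fun ho => h1 ho.1)]
  have hg : pvGather air maps N M q.1 q.2
      = (((if pvOut air maps N M (q.1 - 1) q.2 then (1:Int) else 0)
          + (if pvOut air maps N M (q.1 + 1) q.2 then 1 else 0))
          + (if pvOut air maps N M q.1 (q.2 - 1) then 1 else 0))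
          + (if pvOut air maps N M q.1 (q.2 + 1) then 1 else 0) := by
    have e1 : (q.1 + -1) = q.1 - 1 := by omega
    have e2 : (q.2 + -1) = q.2 - 1 := by omega
    have e3 : (q.1 + 0) = q.1 := by omega
    have e4 : (q.2 + 0) = q.2 := by omega
    simp only [pvGather, pvDirs, List.foldl, e1, e2, e3, e4]
    split_ifs <;> omega
  rw [hg]
  push_cast
  rw [haux, haux, haux, haux]
  ring

-- a nested for-r/for-c fold is the fold over pvCells
theorem pv_foldl_cells {σ : Type} (N M : Int) (f : σ → Int × Int → σ) (init : σ) :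
    (PySem.List.pyRange 0 N 1).foldl (fun s r =>
        (PySem.List.pyRange 0 M 1).foldl (fun s c => f s (r, c)) s) init
      = (pvCells N M).foldl f init := by
  rw [pvCells, List.foldl_flatMap]
  apply PySem.List.foldl_congr_mem
  intro s r _
  rw [List.foldl_map]

theorem pv_mem_cells (N M : Int) (p : Int × Int) :
    p ∈ pvCells N M ↔ (0 ≤ p.1 ∧ p.1 < N ∧ 0 ≤ p.2 ∧ p.2 < M) := by
  obtain ⟨r, c⟩ := p
  simp only [pvCells, List.mem_flatMap, List.mem_map, PySem.List.mem_pyRange_one]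
  constructor
  · rintro ⟨a, ⟨h1, h2⟩, c', ⟨h3, h4⟩, he⟩
    cases he
    exact ⟨h1, h2, h3, h4⟩
  · rintro ⟨h1, h2, h3, h4⟩
    exact ⟨r, ⟨h1, h2⟩, c, ⟨h3, h4⟩, rfl⟩

-- writes to a different (nonneg) cell do not change a read
theorem pvCellB_setB_ne (a : List (List Bool)) (r0 c0 r c : Int) (v : Bool)
    (hr0 : 0 ≤ r0) (hc0 : 0 ≤ c0) (hr : 0 ≤ r) (hc : 0 ≤ c) (hne : (r, c) ≠ (r0, c0)) :
    pvCellB (pvSetB a r0 c0 v) r c = pvCellB a r c := by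
  simp only [pvCellB, pvSetB]
  rw [PySem.List.pySetD_of_nonneg _ _ hr0, PySem.List.pySetD_of_nonneg _ _ hc0,
    PySem.List.pyGetD_of_nonneg _ _ hr, PySem.List.pyGetD_of_nonneg _ _ hr,
    PySem.List.pyGetD_of_nonneg _ _ hc, PySem.List.pyGetD_of_nonneg _ _ hc,
    PySem.List.pyGetD_of_nonneg _ _ hr0]
  simp only [List.getD_eq_getElem?_getD]
  by_cases hrr : r.toNat = r0.toNat
  · have hre : r = r0 := by omega
    subst hre
    have hcc : c ≠ c0 := fun h => hne (by rw [h])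
    have hcv : c0.toNat ≠ c.toNat := by omega
    by_cases hlen : r.toNat < a.length
    · rw [List.getElem?_set_self hlen]
      simp only [Option.getD_some]
      rw [List.getElem?_set_ne hcv]
    · rw [List.set_eq_of_length_le (le_of_not_gt hlen)]
  · have : r0.toNat ≠ r.toNat := fun h => hrr h.symm
    rw [List.getElem?_set_ne this]

-- A's gather count depends on air only through cells with maps = 0
theorem pv_gather_congr (a air : List (List Bool)) (maps : List (List Int)) (N M r c : Int)
    (h : ∀ r' c' : Int, 0 ≤ r' → 0 ≤ c' → pvCellI maps r' c' = 0 →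
        pvCellB a r' c' = pvCellB air r' c') :
    pvGather a maps N M r c = pvGather air maps N M r c := by
  unfold pvGather
  rw [PySem.List.foldl_ite_add_one, PySem.List.foldl_ite_add_one]
  apply congrArg
  apply congrArg
  apply List.countP_congr
  intro d _
  simp only [decide_eq_true_eq]
  constructor <;> rintro ⟨hb, hair, hmap⟩
  · exact ⟨hb, by rw [← h _ _ hb.1 hb.2.2.1 hmap]; exact hair, hmap⟩
  · exact ⟨hb, by rw [h _ _ hb.1 hb.2.2.1 hmap]; exact hair, hmap⟩

-- the air-free melting step both sides are reduced to
def pvStepPure (air : List (List Bool)) (maps : List (List Int)) (N M : Int)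
    (nm : List (List Int)) (p : Int × Int) : List (List Int) :=
  if pvCellI maps p.1 p.2 = 1 ∧ 2 ≤ pvGather air maps N M p.1 p.2 then
    pvSetI nm p.1 p.2 0
  else nm

-- A's stateful fold computes the pure fold (invariant: air only ever changes at maps = 1 cells)
theorem pv_foldA_eq (air : List (List Bool)) (maps : List (List Int)) (N M : Int) :
    ∀ (L : List (Int × Int)) (nm : List (List Int)) (a : List (List Bool)),
      (∀ p ∈ L, 0 ≤ p.1 ∧ 0 ≤ p.2) →
      (∀ r' c' : Int, 0 ≤ r' → 0 ≤ c' → pvCellI maps r' c' = 0 →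
          pvCellB a r' c' = pvCellB air r' c') →
      (L.foldl (pvStepA maps N M) (nm, a)).1 = L.foldl (pvStepPure air maps N M) nm := by
  intro L
  induction L with
  | nil => intro nm a _ _; rfl
  | cons p L ih =>
    intro nm a hpos hinv
    have hp := hpos p (List.mem_cons_self)
    have hg := pv_gather_congr a air maps N M p.1 p.2 hinv
    simp only [List.foldl_cons]
    by_cases h1 : pvCellI maps p.1 p.2 = 1
    · by_cases h2 : 2 ≤ pvGather a maps N M p.1 p.2
      · have hstepA : pvStepA maps N M (nm, a) p
            = (pvSetI nm p.1 p.2 0, pvSetB a p.1 p.2 true) := by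
          simp [pvStepA, h1, h2]
        have hstepP : pvStepPure air maps N M nm p = pvSetI nm p.1 p.2 0 := by
          rw [pvStepPure, if_pos ⟨h1, hg ▸ h2⟩]
        rw [hstepA, hstepP]
        apply ih _ _ (fun q hq => hpos q (List.mem_cons_of_mem _ hq))
        intro r' c' hr hc hm
        rw [pvCellB_setB_ne a p.1 p.2 r' c' true hp.1 hp.2 hr hc
          (fun he => by rw [Prod.mk.injEq] at he; rw [he.1, he.2] at hm; rw [hm] at h1; omega),
          hinv r' c' hr hc hm]
      · have hstepA : pvStepA maps N M (nm, a) p = (nm, a) := by simp [pvStepA, h1, h2]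
        have hstepP : pvStepPure air maps N M nm p = nm := by
          rw [pvStepPure, if_neg (fun hand => h2 (by rw [hg]; exact hand.2))]
        rw [hstepA, hstepP]
        exact ih _ _ (fun q hq => hpos q (List.mem_cons_of_mem _ hq)) hinv
    · have hstepA : pvStepA maps N M (nm, a) p = (nm, a) := by simp [pvStepA, h1]
      have hstepP : pvStepPure air maps N M nm p = nm := by
        rw [pvStepPure, if_neg (fun hand => h1 hand.1)]
      rw [hstepA, hstepP]
      exact ih _ _ (fun q hq => hpos q (List.mem_cons_of_mem _ hq)) hinv

-- B's Counter build is the fold over the increment list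
theorem pv_cnt_eq (air : List (List Bool)) (maps : List (List Int)) (N M : Int) :
    pvCntB air maps N M = (pvIncs air maps N M).foldl pvBump PySem.Dict.empty := by
  rw [pvCntB, pv_foldl_cells (f := fun d (p : Int × Int) =>
        if pvCellI maps p.1 p.2 = 0 ∧ pvCellB air p.1 p.2 = true then
          pvDirs.foldl (fun d dd => pvBump d (p.1 + dd.1, p.2 + dd.2)) d
        else d)]
  rw [pvIncs, List.foldl_flatMap]
  apply PySem.List.foldl_congr_mem
  intro d p _
  by_cases h : pvCellI maps p.1 p.2 = 0 ∧ pvCellB air p.1 p.2 = true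
  · rw [if_pos h, if_pos h, List.foldl_map]
  · rw [if_neg h, if_neg h]; rfl

theorem pv_A_eq_pure (air : List (List Bool)) (maps : List (List Int)) (N M : Int) :
    melt_cheese air maps N M = (pvCells N M).foldl (pvStepPure air maps N M) maps := by
  unfold melt_cheese
  rw [pv_foldl_cells]
  exact pv_foldA_eq air maps N M (pvCells N M) maps air
    (fun p hp => by have := (pv_mem_cells N M p).mp hp; exact ⟨this.1, this.2.2.1⟩)
    (fun _ _ _ _ _ => rfl)

theorem pv_B_eq_pure (air : List (List Bool)) (maps : List (List Int)) (N M : Int) :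
    melt_cheese_alt air maps N M = (pvCells N M).foldl (pvStepPure air maps N M) maps := by
  unfold melt_cheese_alt
  rw [pv_foldl_cells (f := fun nm (p : Int × Int) =>
        if pvCellI maps p.1 p.2 = 1 ∧ 2 ≤ (pvCntB air maps N M).getD (p.1, p.2) 0 then
          pvSetI nm p.1 p.2 0
        else nm)]
  apply PySem.List.foldl_congr_mem
  intro nm p _
  have hget : (pvCntB air maps N M).getD (p.1, p.2) 0 = pvGather air maps N M p.1 p.2 := by
    rw [pv_cnt_eq]
    have h0 : (pvIncs air maps N M).foldl pvBump PySem.Dict.empty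
        = (pvIncs air maps N M).foldl (fun d x => d.modify x 0 (· + 1)) PySem.Dict.empty := rfl
    rw [h0, PySem.Dict.getD_foldl_modify_add_one, PySem.Dict.getD_empty,
      ← pv_count_incs air maps N M (p.1, p.2)]
    omega
  rw [hget]
  rfl

-- ===== VERDICT (by name: the statement is the Claim_ definition above) =====
theorem melt_cheese_spec : Claim_equal_melt_cheese := by
  intro air maps N M _ _
  unfold Spec_melt_cheese
  rw [pv_A_eq_pure, pv_B_eq_pure]
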